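-- pv_equiv track=rewrite | github.com/JeongGod/Algo-study | JeongGod/13week/baekjoon/2563.py | solution
-- ===== SOURCE A (Python) =====
-- def solution(papers : list[list[int, int]]) -> int:
--     board = [[0] * 101 for _ in range(101)];
--
--     for y, x in papers:
--         for i in range(x, x+10):
--             for j in range(y, y+10):
--                 board[i][j] = 1
--
--
--
--     result = 0
--     for b in board:
--         result += sum(b)
--
--
--     return result
-- ===== SOURCE B (Python) =====
-- def solution(papers):
--     # For each board row, collect the y-spans [y, y+10) of the papers covering
--     # that row, then merge each row's sorted spans and sum the covered lengths.
--     row_spans = [[] for _ in range(101)]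
--     for y, x in papers:
--         for i in range(x, x + 10):
--             row_spans[i].append((y, y + 10))
--     result = 0
--     for spans in row_spans:
--         spans.sort(key=lambda t: t[0])
--         reach = 0
--         for s, e in spans:
--             if e > reach:
--                 result += e - max(s, reach)
--                 reach = e
--     return result
-- ===== Notes on version B (the rewrite author's own statement) =====
-- stated objective: alternative
-- what changed: Instead of stamping every 10x10 paper cell-by-cell into a 101x101 grid and summing all cells, B bins each paper's y-span [y,y+10) into the board rows it covers, then merges each row's sorted spans and accumulates the covered lengths; no cell grid exists. Pre_ excludes only papers with negative first coordinate y, where A returns a value produced solely by Python's accidental negative-index wraparound of the inner board column writes, an artefact B's span merge does not reproduce; elsewhere outside Pre_ A raises.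
-- outside the precondition, e.g. on solution([[-5, 0]]): A returns 100, B returns 50
import Mathlib
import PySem

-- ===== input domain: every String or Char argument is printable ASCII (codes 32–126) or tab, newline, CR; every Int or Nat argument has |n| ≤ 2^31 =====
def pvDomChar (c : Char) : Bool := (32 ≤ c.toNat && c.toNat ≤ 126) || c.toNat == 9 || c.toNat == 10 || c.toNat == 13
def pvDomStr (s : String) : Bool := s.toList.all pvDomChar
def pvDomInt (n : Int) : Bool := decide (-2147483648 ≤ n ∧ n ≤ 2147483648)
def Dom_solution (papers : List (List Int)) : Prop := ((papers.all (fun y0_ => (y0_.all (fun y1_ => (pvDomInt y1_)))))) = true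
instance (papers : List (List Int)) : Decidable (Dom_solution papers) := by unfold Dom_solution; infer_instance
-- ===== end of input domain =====

-- B bins each paper's y-span by board row and merges each row's sorted spans, instead of
-- stamping cells into a 101x101 grid (alternative algorithm); same value on Pre_.

-- ===== PORT A =====
-- board[i][j] = 1 for i in range(x,x+10), j in range(y,y+10); pyGetD/pySetD are
-- exact for the in-range indices guaranteed by Pre_solution.
def solution (papers : List (List Int)) : Int :=
  let board : List (List Int) := List.replicate 101 (List.replicate 101 0)
  let board := papers.foldl (fun b p =>
    match p with
    | [y, x] =>
        (PySem.List.pyRange x (x + 10) 1).foldl (fun b i =>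
          PySem.List.pySetD b i
            ((PySem.List.pyRange y (y + 10) 1).foldl
              (fun row j => PySem.List.pySetD row j 1)
              (PySem.List.pyGetD b i []))) b
    | _ => b) board  -- a row that is not a pair raises ValueError in Python: outside Pre_solution
  board.foldl (fun result b => result + b.sum) 0

-- ===== PORT B =====
-- 'for y, x in papers' unpacking raises on a non-pair row: outside Pre_solution;
-- row_spans[i].append is pyGetD/pySetD, exact for the in-range row indices of Pre_solution.
def binRows (rs : List (List (Int × Int))) (p : List Int) : List (List (Int × Int)) :=
  match p with
  | [y, x] =>
      (PySem.List.pyRange x (x + 10) 1).foldl (fun rs i =>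
        PySem.List.pySetD rs i (PySem.List.pyGetD rs i [] ++ [(y, y + 10)])) rs
  | [] => rs
  | [_] => rs
  | _ :: _ :: _ :: _ => rs

def solution_alt (papers : List (List Int)) : Int :=
  let rowSpans : List (List (Int × Int)) := List.replicate 101 []
  let rowSpans := papers.foldl binRows rowSpans
  rowSpans.foldl (fun result spans =>
    ((PySem.List.sorted spans (fun t => t.1) false).foldl (fun (st : Int × Int) se =>
        if se.2 > st.2 then (st.1 + (se.2 - max se.1 st.2), se.2) else st)
      (result, 0)).1) 0

-- ===== PRECONDITION & SPEC =====
-- Pre_ requires each paper to be a pair [y, x] with 0 ≤ y ≤ 91 and -101 ≤ x ≤ 91.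
-- It is narrower than A's returning domain only for y in [-101, -1]: there A returns a
-- value produced solely by Python's accidental negative-index wraparound of the inner
-- board[i][j] column writes, an artefact B's span merge does not reproduce.  On
-- coordinates outside [-101, 91] or non-pair rows A raises (IndexError / ValueError).
def Pre_solution (papers : List (List Int)) : Prop :=
  ∀ p ∈ papers, p.length = 2 ∧ 0 ≤ p.getD 0 0 ∧ p.getD 0 0 ≤ 91
    ∧ -101 ≤ p.getD 1 0 ∧ p.getD 1 0 ≤ 91
instance (papers : List (List Int)) : Decidable (Pre_solution papers) := by
  unfold Pre_solution; infer_instance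
def pvWitness_solution : List (List Int) := [[0, 0], [5, 5]]
def Spec_solution (papers : List (List Int)) (out : Int) : Prop := out = solution_alt papers
instance (papers : List (List Int)) (out : Int) : Decidable (Spec_solution papers out) := by
  unfold Spec_solution; infer_instance

-- ===== CLAIM (what is proved, stated in full; the proofs are below) =====
def Claim_equal_solution : Prop :=
  ∀ (papers : List (List Int)), Dom_solution papers → Pre_solution papers →
    Spec_solution papers (solution papers)

-- ===== LEMMAS AND PROOFS =====

-- unpacking Pre_solution's per-paper facts
lemma pre_pair {papers : List (List Int)} (hpre : Pre_solution papers) {p : List Int}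
    (hp : p ∈ papers) : ∃ y x, p = [y, x] ∧ 0 ≤ y ∧ y ≤ 91 ∧ -101 ≤ x ∧ x ≤ 91 := by
  obtain ⟨hl, h⟩ := hpre p hp
  obtain ⟨y, x, rfl⟩ := List.length_eq_two.mp hl
  exact ⟨y, x, rfl, by simpa using h⟩

-- the board slot Python's (possibly negative) index m addresses in a 101-list
def idx101 (m : Int) : Nat := if 0 ≤ m then m.toNat else 101 - (-m).toNat

-- does paper p (= [y, x]) cover cell (i, j) of the board (wrapping indices)?
def inSq (p : List Int) (i j : Int) : Bool :=
  match p with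
  | [y, x] => decide ((x ≤ i ∧ i < x + 10 ∨ x ≤ i - 101 ∧ i - 101 < x + 10) ∧
                      (y ≤ j ∧ j < y + 10 ∨ y ≤ j - 101 ∧ j - 101 < y + 10))
  | _ => false

-- is cell (i, j) covered by some paper?
def covB (papers : List (List Int)) (i j : Int) : Bool :=
  papers.any (fun p => inSq p i j)

-- cell (i,j) of a board (getD-based, total)
def bget (b : List (List Int)) (i j : Nat) : Int := (b.getD i []).getD j 0

-- number of covered cells in row i, as an Int
def colCount (papers : List (List Int)) (i : Int) : Int :=
  ((List.range 101).countP (fun (j : Nat) => covB papers i (j : Int)) : Int)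

lemma pySetD_idx101 {α : Type} (xs : List α) (i : Int) (v : α)
    (hl : xs.length = 101) (h1 : -101 ≤ i) (h2 : i < 101) :
    PySem.List.pySetD xs i v = xs.set (idx101 i) v := by
  unfold idx101 PySem.List.pySetD PySem.List.pySet? PySem.List.pyIdx?
  rw [hl]
  split_ifs <;> simp <;> omega

lemma pyGetD_idx101 {α : Type} (xs : List α) (i : Int) (d : α)
    (hl : xs.length = 101) (h1 : -101 ≤ i) (h2 : i < 101) :
    PySem.List.pyGetD xs i d = xs.getD (idx101 i) d := by
  unfold idx101 PySem.List.pyGetD PySem.List.pyGet? PySem.List.pyIdx?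
  rw [hl]
  split_ifs with hA hB hC
  · simp [List.getD_eq_getElem?_getD]
  · exfalso; omega
  · simp [List.getD_eq_getElem?_getD]
  · exfalso; omega

lemma idx101_lt (m : Int) (h1 : -101 ≤ m) (h2 : m < 101) : idx101 m < 101 := by
  unfold idx101; split_ifs <;> omega

lemma idx101_cases (m : Int) (h1 : -101 ≤ m) (h2 : m < 101) :
    ((idx101 m : Int) = m ∨ (idx101 m : Int) = m + 101) := by
  unfold idx101; split_ifs <;> omega

-- ---- small counting lemmas ----

lemma countP_or_disjoint {a : Type} (p q : a -> Bool) :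
    ∀ l : List a, (∀ x ∈ l, ¬(p x = true ∧ q x = true)) →
      l.countP (fun x => p x || q x) = l.countP p + l.countP q := by
  intro l
  induction l with
  | nil => intro _; simp
  | cons x t ih =>
    intro h
    have ht := ih (fun b hb => h b (List.mem_cons_of_mem _ hb))
    have hx := h x (List.mem_cons_self ..)
    simp only [List.countP_cons, ht]
    cases hp : p x <;> cases hq : q x <;> simp_all <;> omega

lemma countP_interval (lo hi : Int) (h0 : 0 ≤ lo) (n : Nat) :
    (((List.range n).countP (fun (j : Nat) => decide (lo ≤ (j : Int) ∧ (j : Int) < hi))) : Int)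
      = max 0 (min hi n - lo) := by
  induction n with
  | zero => simp; omega
  | succ n ih =>
    rw [List.range_succ, List.countP_append]
    have hone : (List.countP (fun (j : Nat) => decide (lo ≤ (j : Int) ∧ (j : Int) < hi)) [n])
        = if lo ≤ (n : Int) ∧ (n : Int) < hi then 1 else 0 := by
      simp [List.countP_cons]
    rw [hone]
    by_cases hc : lo ≤ (n : Int) ∧ (n : Int) < hi
    · rw [if_pos hc]; push_cast [ih]; omega
    · rw [if_neg hc]; push_cast [ih]; push_cast at hc; omega

-- ---- B side ----

def mergeStep (st : Int × Int) (se : Int × Int) : Int × Int :=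
  if se.2 > st.2 then (st.1 + (se.2 - max se.1 st.2), se.2) else st

def covS (spans : List (Int × Int)) (j : Int) : Bool :=
  spans.any (fun se => decide (se.1 ≤ j ∧ j < se.2))

lemma merge_count : ∀ (spans : List (Int × Int)), spans.Pairwise (fun a b => a.1 ≤ b.1) →
    (∀ se ∈ spans, 0 ≤ se.1 ∧ se.1 < se.2 ∧ se.2 ≤ 101) →
    ∀ reach acc, 0 ≤ reach →
      (spans.foldl mergeStep (acc, reach)).1
        = acc + (((List.range 101).countP
            (fun (j : Nat) => decide (reach ≤ (j : Int)) && covS spans (j : Int))) : Int) := by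
  intro spans
  induction spans with
  | nil =>
    intro _ _ reach acc _
    simp [covS]
  | cons se t ih =>
    obtain ⟨s, e⟩ := se
    intro hs hb reach acc h0
    have hse : 0 ≤ s ∧ s < e ∧ e ≤ 101 := hb (s, e) (by simp)
    have htb : ∀ z ∈ t, 0 ≤ z.1 ∧ z.1 < z.2 ∧ z.2 ≤ 101 :=
      fun z hz => hb z (List.mem_cons_of_mem _ hz)
    have hyt : ∀ z ∈ t, s ≤ z.1 := (List.pairwise_cons.mp hs).1
    have hst : t.Pairwise (fun a b => a.1 ≤ b.1) := (List.pairwise_cons.mp hs).2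
    rw [List.foldl_cons]
    by_cases hcase : e > reach
    · have hstep : mergeStep (acc, reach) (s, e) = (acc + (e - max s reach), e) := by
        unfold mergeStep; rw [if_pos]; exact hcase
      rw [hstep, ih hst htb e _ (by omega)]
      have hdisj : ∀ j ∈ List.range 101,
          ¬((decide (max s reach ≤ (j : Int) ∧ (j : Int) < e)) = true ∧
            ((decide (e ≤ (j : Int)) && covS t (j : Int))) = true) := by
        intro j _
        simp only [Bool.and_eq_true, decide_eq_true_eq]
        rintro ⟨⟨_, h1⟩, ⟨h2, _⟩⟩
        omega
      have hsplit : ((List.range 101).countP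
            (fun (j : Nat) => decide (reach ≤ (j : Int)) && covS ((s, e) :: t) (j : Int)))
          = ((List.range 101).countP
              (fun (j : Nat) => decide (max s reach ≤ (j : Int) ∧ (j : Int) < e)))
            + ((List.range 101).countP
              (fun (j : Nat) => decide (e ≤ (j : Int)) && covS t (j : Int))) := by
        rw [← countP_or_disjoint _ _ _ hdisj]
        apply List.countP_congr
        intro j _
        simp only [covS, List.any_cons, List.any_eq_true, Bool.and_eq_true, Bool.or_eq_true,
          decide_eq_true_eq]
        constructor
        · rintro ⟨hrj, hyc | ⟨z, hz, hz1, hz2⟩⟩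
          · left; exact ⟨by omega, by omega⟩
          · have hyz := hyt z hz
            by_cases hj : (j : Int) < e
            · left; exact ⟨by omega, by omega⟩
            · right; exact ⟨by omega, z, hz, hz1, hz2⟩
        · rintro (⟨hm, hlt⟩ | ⟨hge, z, hz, hz1, hz2⟩)
          · exact ⟨by omega, Or.inl ⟨by omega, by omega⟩⟩
          · exact ⟨by omega, Or.inr ⟨z, hz, hz1, hz2⟩⟩
      have hC1 := countP_interval (max s reach) e (by omega) 101
      rw [hsplit]
      push_cast [hC1]
      push_cast at hC1
      omega
    · have hstep : mergeStep (acc, reach) (s, e) = (acc, reach) := by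
        unfold mergeStep; rw [if_neg]; exact hcase
      rw [hstep, ih hst htb reach acc h0]
      congr 2
      apply List.countP_congr
      intro j _
      simp only [covS, List.any_cons, List.any_eq_true, Bool.and_eq_true, Bool.or_eq_true,
        decide_eq_true_eq]
      constructor
      · rintro ⟨hrj, z, hz, hz1, hz2⟩
        exact ⟨hrj, Or.inr ⟨z, hz, hz1, hz2⟩⟩
      · rintro ⟨hrj, hyc | ⟨z, hz, hz1, hz2⟩⟩
        · exact absurd hyc (by omega)
        · exact ⟨hrj, z, hz, hz1, hz2⟩

-- binning one paper's span into its rows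
lemma rowBinN (spans : List (Int × Int)) (x : Int) (hx : -101 ≤ x) :
    ∀ (n : Nat) (rs : List (List (Int × Int))), n ≤ 10 → x + n ≤ 101 → rs.length = 101 →
      ((((List.range n).map (fun (k : Nat) => x + (k : Int))).foldl
          (fun rs k => PySem.List.pySetD rs k (PySem.List.pyGetD rs k [] ++ spans)) rs).length = 101 ∧
       ∀ i : Nat, i < 101 → (((List.range n).map (fun (k : Nat) => x + (k : Int))).foldl
          (fun rs k => PySem.List.pySetD rs k (PySem.List.pyGetD rs k [] ++ spans)) rs).getD i []
          = if (x ≤ (i : Int) ∧ (i : Int) < x + n)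
              ∨ (x ≤ (i : Int) - 101 ∧ (i : Int) - 101 < x + n)
            then rs.getD i [] ++ spans else rs.getD i []) := by
  intro n
  induction n with
  | zero =>
    intro rs _ _ hl
    refine ⟨hl, fun i hi => ?_⟩
    simp only [List.range_zero, List.map_nil, List.foldl_nil]
    rw [if_neg (by push_cast; omega)]
  | succ n ih =>
    intro rs hn h hl
    obtain ⟨ihlen, ihget⟩ := ih rs (by omega) (by push_cast at h ⊢; omega) hl
    rw [List.range_succ, List.map_append, List.foldl_append]
    simp only [List.map_cons, List.map_nil, List.foldl_cons, List.foldl_nil]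
    have hmr : -101 ≤ x + (n : Int) ∧ x + (n : Int) < 101 := by push_cast at h; omega
    have hix := idx101_cases (x + (n : Int)) hmr.1 hmr.2
    have hixlt := idx101_lt (x + (n : Int)) hmr.1 hmr.2
    have hget : PySem.List.pyGetD (((List.range n).map (fun (k : Nat) => x + (k : Int))).foldl
        (fun rs k => PySem.List.pySetD rs k (PySem.List.pyGetD rs k [] ++ spans)) rs) (x + (n : Int)) []
        = rs.getD (idx101 (x + (n : Int))) [] := by
      rw [pyGetD_idx101 _ _ _ ihlen hmr.1 hmr.2]
      rw [ihget (idx101 (x + (n : Int))) hixlt]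
      rw [if_neg (by rcases hix with hh | hh <;> push_cast <;> omega)]
    rw [hget, pySetD_idx101 _ _ _ ihlen hmr.1 hmr.2]
    refine ⟨by rw [List.length_set, ihlen], fun i hi => ?_⟩
    rw [List.getD_eq_getElem?_getD, List.getElem?_set]
    by_cases hjx : idx101 (x + (n : Int)) = i
    · rw [if_pos hjx, if_pos (by rw [ihlen]; omega)]
      simp only [Option.getD_some]
      rw [if_pos (by rw [← hjx]; rcases hix with hh | hh <;> push_cast <;> omega), ← hjx]
    · rw [if_neg hjx, ← List.getD_eq_getElem?_getD, ihget i hi]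
      have hne : ¬((i : Int) = x + n ∨ (i : Int) - 101 = x + n) := by
        rintro (hq | hq) <;> exact hjx (by rcases hix with hh | hh <;> omega)
      by_cases hc : (x ≤ (i : Int) ∧ (i : Int) < x + (n : Int))
          ∨ (x ≤ (i : Int) - 101 ∧ (i : Int) - 101 < x + (n : Int))
      · rw [if_pos hc, if_pos (by push_cast; push_cast at hc; omega)]
      · rw [if_neg hc, if_neg (by push_cast; push_cast at hc; omega)]

-- the whole binning fold: shape plus per-row membership of spans
lemma bin_spec : ∀ (papers : List (List Int)), Pre_solution papers →
    ∀ rs : List (List (Int × Int)), rs.length = 101 →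
      (papers.foldl binRows rs).length = 101 ∧
      ∀ i : Nat, i < 101 → ∀ z : Int × Int,
        (z ∈ (papers.foldl binRows rs).getD i []
        ↔ z ∈ rs.getD i []
          ∨ ∃ y x, [y, x] ∈ papers
              ∧ ((x ≤ (i : Int) ∧ (i : Int) < x + 10) ∨ (x ≤ (i : Int) - 101 ∧ (i : Int) - 101 < x + 10))
              ∧ z = (y, y + 10)) := by
  intro papers
  induction papers with
  | nil =>
    intro _ rs hl
    refine ⟨hl, fun i hi z => ?_⟩
    simp
  | cons p ps ih =>
    intro hpre rs hl
    obtain ⟨a, c, rfl, hy0, hy1, hx0, hx1⟩ := pre_pair hpre (List.mem_cons_self ..)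
    have hps : Pre_solution ps := fun q hq => hpre q (List.mem_cons_of_mem _ hq)
    rw [List.foldl_cons]
    have hrw : binRows rs [a, c]
        = (((List.range 10).map (fun (k : Nat) => c + (k : Int))).foldl
            (fun rs k => PySem.List.pySetD rs k (PySem.List.pyGetD rs k [] ++ [(a, a + 10)])) rs) := by
      show (PySem.List.pyRange c (c + 10) 1).foldl
          (fun rs i => PySem.List.pySetD rs i (PySem.List.pyGetD rs i [] ++ [(a, a + 10)])) rs = _
      rw [PySem.List.pyRange_one, show ((c + 10) - c).toNat = 10 from by omega]
    rw [hrw]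
    obtain ⟨b1, b2⟩ := rowBinN [(a, a + 10)] c (by omega) 10 rs (by omega) (by push_cast; omega) hl
    obtain ⟨f1, f2⟩ := ih hps _ b1
    refine ⟨f1, fun i hi z => ?_⟩
    rw [f2 i hi z, b2 i hi]
    by_cases hact : (c ≤ (i : Int) ∧ (i : Int) < c + ((10 : Nat) : Int))
        ∨ (c ≤ (i : Int) - 101 ∧ (i : Int) - 101 < c + ((10 : Nat) : Int))
    · rw [if_pos hact]
      constructor
      · rintro (hin | ⟨y, x, hmem, hx, hz⟩)
        · rcases List.mem_append.mp hin with hold | hnew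
          · exact Or.inl hold
          · exact Or.inr ⟨a, c, by simp, by push_cast at hact; exact hact, by simpa using hnew⟩
        · exact Or.inr ⟨y, x, List.mem_cons_of_mem _ hmem, hx, hz⟩
      · rintro (hin | ⟨y, x, hmem, hx, hz⟩)
        · exact Or.inl (List.mem_append.mpr (Or.inl hin))
        · rcases List.mem_cons.mp hmem with heq | hmem'
          · injection heq with h1 h2
            subst h1
            exact Or.inl (List.mem_append.mpr (Or.inr (by simp [hz])))
          · exact Or.inr ⟨y, x, hmem', hx, hz⟩
    · rw [if_neg hact]
      constructor
      · rintro (hin | ⟨y, x, hmem, hx, hz⟩)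
        · exact Or.inl hin
        · exact Or.inr ⟨y, x, List.mem_cons_of_mem _ hmem, hx, hz⟩
      · rintro (hin | ⟨y, x, hmem, hx, hz⟩)
        · exact Or.inl hin
        · rcases List.mem_cons.mp hmem with heq | hmem'
          · exfalso
            injection heq with h1 h2
            injection h2 with h3 h4
            subst h3
            exact hact (by push_cast; exact hx)
          · exact Or.inr ⟨y, x, hmem', hx, hz⟩

-- a binned row covers column j exactly when some paper covers cell (i, j)
lemma covS_row (papers : List (List Int)) (hpre : Pre_solution papers) (i : Nat) (hi : i < 101)
    (spans : List (Int × Int))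
    (hch : ∀ z : Int × Int, z ∈ spans
      ↔ ∃ y x, [y, x] ∈ papers
          ∧ ((x ≤ (i : Int) ∧ (i : Int) < x + 10) ∨ (x ≤ (i : Int) - 101 ∧ (i : Int) - 101 < x + 10))
          ∧ z = (y, y + 10))
    (j : Nat) (hj : j < 101) :
    ((decide ((0 : Int) ≤ (j : Int)) && covS spans (j : Int)) = true)
      ↔ (covB papers (i : Int) (j : Int) = true) := by
  simp only [Bool.and_eq_true, decide_eq_true_eq, covS, covB, List.any_eq_true]
  constructor
  · rintro ⟨-, z, hz, hz1, hz2⟩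
    obtain ⟨y, x, hp, hx, rfl⟩ := (hch z).mp hz
    refine ⟨[y, x], hp, ?_⟩
    simp only [inSq, decide_eq_true_eq]
    exact ⟨hx, Or.inl ⟨hz1, hz2⟩⟩
  · rintro ⟨p, hp, hsq⟩
    obtain ⟨a, c, rfl, hy0, hy1, hx0, hx1⟩ := pre_pair hpre hp
    simp only [inSq, decide_eq_true_eq] at hsq
    obtain ⟨hx, hcol⟩ := hsq
    refine ⟨Int.natCast_nonneg j, (a, a + 10), (hch _).mpr ⟨a, c, hp, hx, rfl⟩, ?_, ?_⟩
    · show a ≤ (j : Int)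
      rcases hcol with hc | hc <;> omega
    · show (j : Int) < a + 10
      rcases hcol with hc | hc <;> omega

lemma alt_eq (papers : List (List Int)) (hpre : Pre_solution papers) :
    solution_alt papers
      = ((List.range 101).map (fun (i : Nat) => colCount papers (i : Int))).sum := by
  obtain ⟨f1, f2⟩ := bin_spec papers hpre (List.replicate 101 []) (by simp)
  have hsol : solution_alt papers
      = (papers.foldl binRows
          (List.replicate 101 [])).foldl (fun result spans =>
        ((PySem.List.sorted spans (fun t => t.1) false).foldl mergeStep (result, 0)).1) 0 := rfl
  rw [hsol]
  set final := papers.foldl binRows (List.replicate 101 []) with hfinal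
  have hchar : ∀ i : Nat, i < 101 → ∀ z : Int × Int,
      (z ∈ final.getD i []
        ↔ ∃ y x, [y, x] ∈ papers
            ∧ ((x ≤ (i : Int) ∧ (i : Int) < x + 10) ∨ (x ≤ (i : Int) - 101 ∧ (i : Int) - 101 < x + 10))
            ∧ z = (y, y + 10)) := by
    intro i hi z
    rw [f2 i hi z, List.getD_replicate _ hi]
    simp
  have hcong := PySem.List.foldl_congr_mem final
    (fun (result : Int) (spans : List (Int × Int)) =>
      ((PySem.List.sorted spans (fun t => t.1) false).foldl mergeStep (result, 0)).1)
    (fun (result : Int) (spans : List (Int × Int)) =>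
      result + (((List.range 101).countP
        (fun (j : Nat) => decide ((0 : Int) ≤ (j : Int)) && covS spans (j : Int))) : Int)) 0
    (fun acc spans hsp => by
      obtain ⟨k, hk, hkz⟩ := List.mem_iff_getElem.mp hsp
      have hk101 : k < 101 := by rw [f1] at hk; exact hk
      have hgd : final.getD k [] = spans := by
        rw [List.getD_eq_getElem _ _ hk, hkz]
      have hpair : (PySem.List.sorted spans (fun t => t.1) false).Pairwise
          (fun a b => a.1 ≤ b.1) := PySem.List.sorted_pairwise spans (fun t => t.1)
      have hbound : ∀ se ∈ PySem.List.sorted spans (fun t => t.1) false,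
          0 ≤ se.1 ∧ se.1 < se.2 ∧ se.2 ≤ 101 := by
        intro se hin
        have hin' : se ∈ spans := (PySem.List.mem_sorted ..).mp hin
        rw [← hgd] at hin'
        obtain ⟨y, x, hp, hx, rfl⟩ := (hchar k hk101 se).mp hin'
        obtain ⟨y2, x2, heq, hy0, hy1, _, _⟩ := pre_pair hpre hp
        injection heq with e1 e2
        injection e2 with e3 e4
        subst e1 e3
        exact ⟨by omega, by omega, by omega⟩
      show ((PySem.List.sorted spans (fun t => t.1) false).foldl mergeStep (acc, 0)).1
          = acc + (((List.range 101).countP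
            (fun (j : Nat) => decide ((0 : Int) ≤ (j : Int)) && covS spans (j : Int))) : Int)
      rw [merge_count (PySem.List.sorted spans (fun t => t.1) false) hpair hbound 0 acc
          (le_refl 0)]
      congr 2
      apply List.countP_congr
      intro j _
      simp only [Bool.and_eq_true, decide_eq_true_eq, covS, List.any_eq_true]
      constructor
      · rintro ⟨h0, z, hz, hzc⟩
        exact ⟨h0, z, (PySem.List.mem_sorted ..).mp hz, hzc⟩
      · rintro ⟨h0, z, hz, hzc⟩
        exact ⟨h0, z, (PySem.List.mem_sorted ..).mpr hz, hzc⟩)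
  rw [hcong, PySem.List.foldl_add, zero_add]
  congr 1
  apply List.ext_getElem (by simp only [List.length_map, List.length_range, f1])
  intro i h1 h2
  have hi : i < 101 := by
    simp only [List.length_map, f1] at h1
    exact h1
  simp only [List.getElem_map, List.getElem_range]
  have hgd : final.getD i [] = final[i] :=
    List.getD_eq_getElem final [] (by rw [f1]; exact hi)
  rw [← hgd]
  unfold colCount
  congr 1
  apply List.countP_congr
  intro j hjmem
  exact covS_row papers hpre i hi (final.getD i []) (hchar i hi) j (List.mem_range.mp hjmem)

-- ---- A side ----

def rowMark (row : List Int) (y : Int) : List Int :=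
  (PySem.List.pyRange y (y + 10) 1).foldl (fun row j => PySem.List.pySetD row j 1) row

def boardMark (b : List (List Int)) (y x : Int) : List (List Int) :=
  (PySem.List.pyRange x (x + 10) 1).foldl (fun b i =>
    PySem.List.pySetD b i (rowMark (PySem.List.pyGetD b i []) y)) b

lemma rowMarkN (y : Int) (hy : -101 ≤ y) :
    ∀ (n : Nat) (row : List Int), n ≤ 10 → y + n ≤ 101 → row.length = 101 →
      ((((List.range n).map (fun (k : Nat) => y + (k : Int))).foldl
        (fun r j => PySem.List.pySetD r j 1) row).length = 101 ∧
      ∀ j : Nat, j < 101 → (((List.range n).map (fun (k : Nat) => y + (k : Int))).foldl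
        (fun r j => PySem.List.pySetD r j 1) row).getD j 0
          = if (y ≤ (j : Int) ∧ (j : Int) < y + n)
              ∨ (y ≤ (j : Int) - 101 ∧ (j : Int) - 101 < y + n)
            then 1 else row.getD j 0) := by
  intro n
  induction n with
  | zero =>
    intro row _ _ hl
    refine ⟨hl, fun j hj => ?_⟩
    simp only [List.range_zero, List.map_nil, List.foldl_nil]
    rw [if_neg (by push_cast; omega)]
  | succ n ih =>
    intro row hn h hl
    obtain ⟨ihlen, ihget⟩ := ih row (by omega) (by push_cast at h ⊢; omega) hl
    rw [List.range_succ, List.map_append, List.foldl_append]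
    simp only [List.map_cons, List.map_nil, List.foldl_cons, List.foldl_nil]
    have hmr : -101 ≤ y + (n : Int) ∧ y + (n : Int) < 101 := by push_cast at h; omega
    rw [pySetD_idx101 _ _ _ ihlen hmr.1 hmr.2]
    have hix := idx101_cases (y + (n : Int)) hmr.1 hmr.2
    have hixlt := idx101_lt (y + (n : Int)) hmr.1 hmr.2
    refine ⟨by rw [List.length_set, ihlen], fun j hj => ?_⟩
    rw [List.getD_eq_getElem?_getD, List.getElem?_set]
    by_cases hjx : idx101 (y + (n : Int)) = j
    · rw [if_pos hjx, if_pos (by rw [ihlen]; omega)]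
      simp only [Option.getD_some]
      rw [if_pos (by rw [← hjx]; rcases hix with hh | hh <;> push_cast <;> omega)]
    · rw [if_neg hjx, ← List.getD_eq_getElem?_getD, ihget j hj]
      have hne : ¬((j : Int) = y + n ∨ (j : Int) - 101 = y + n) := by
        rintro (hq | hq) <;> exact hjx (by rcases hix with hh | hh <;> omega)
      by_cases hc : (y ≤ (j : Int) ∧ (j : Int) < y + (n : Int))
          ∨ (y ≤ (j : Int) - 101 ∧ (j : Int) - 101 < y + (n : Int))
      · rw [if_pos hc, if_pos (by push_cast; push_cast at hc; omega)]
      · rw [if_neg hc, if_neg (by push_cast; push_cast at hc; omega)]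

lemma rowMark_spec (row : List Int) (y : Int) (hy : -101 ≤ y) (hy' : y ≤ 91)
    (hlen : row.length = 101) :
    (rowMark row y).length = 101 ∧
    ∀ j : Nat, j < 101 → (rowMark row y).getD j 0
      = if (y ≤ (j : Int) ∧ (j : Int) < y + 10)
          ∨ (y ≤ (j : Int) - 101 ∧ (j : Int) - 101 < y + 10)
        then 1 else row.getD j 0 := by
  unfold rowMark
  rw [PySem.List.pyRange_one, show ((y + 10) - y).toNat = 10 from by omega]
  obtain ⟨h1, h2⟩ := rowMarkN y hy 10 row (by omega) (by push_cast; omega) hlen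
  refine ⟨h1, fun j hj => ?_⟩
  rw [h2 j hj]
  norm_num

lemma boardMarkN (y x : Int) (hy : -101 ≤ y) (hy' : y ≤ 91) (hx : -101 ≤ x) :
    ∀ (n : Nat) (b : List (List Int)), n ≤ 10 → x + n ≤ 101 → b.length = 101 →
      (∀ i : Nat, i < 101 → (b.getD i []).length = 101) →
      ((((List.range n).map (fun (k : Nat) => x + (k : Int))).foldl
          (fun b i => PySem.List.pySetD b i (rowMark (PySem.List.pyGetD b i []) y)) b).length = 101 ∧
       ∀ i : Nat, i < 101 → (((List.range n).map (fun (k : Nat) => x + (k : Int))).foldl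
          (fun b i => PySem.List.pySetD b i (rowMark (PySem.List.pyGetD b i []) y)) b).getD i []
          = if (x ≤ (i : Int) ∧ (i : Int) < x + n)
              ∨ (x ≤ (i : Int) - 101 ∧ (i : Int) - 101 < x + n)
            then rowMark (b.getD i []) y else b.getD i []) := by
  intro n
  induction n with
  | zero =>
    intro b _ _ hb1 _
    refine ⟨hb1, fun i hi => ?_⟩
    simp only [List.range_zero, List.map_nil, List.foldl_nil]
    rw [if_neg (by push_cast; omega)]
  | succ n ih =>
    intro b hn h hb1 hb2
    obtain ⟨ihlen, ihget⟩ := ih b (by omega) (by push_cast at h ⊢; omega) hb1 hb2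
    rw [List.range_succ, List.map_append, List.foldl_append]
    simp only [List.map_cons, List.map_nil, List.foldl_cons, List.foldl_nil]
    have hmr : -101 ≤ x + (n : Int) ∧ x + (n : Int) < 101 := by push_cast at h; omega
    have hix := idx101_cases (x + (n : Int)) hmr.1 hmr.2
    have hixlt := idx101_lt (x + (n : Int)) hmr.1 hmr.2
    have hget : PySem.List.pyGetD (((List.range n).map (fun (k : Nat) => x + (k : Int))).foldl
        (fun b i => PySem.List.pySetD b i (rowMark (PySem.List.pyGetD b i []) y)) b) (x + (n : Int)) []
        = b.getD (idx101 (x + (n : Int))) [] := by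
      rw [pyGetD_idx101 _ _ _ ihlen hmr.1 hmr.2]
      rw [ihget (idx101 (x + (n : Int))) hixlt]
      rw [if_neg (by rcases hix with hh | hh <;> push_cast <;> omega)]
    rw [hget, pySetD_idx101 _ _ _ ihlen hmr.1 hmr.2]
    refine ⟨by rw [List.length_set, ihlen], fun i hi => ?_⟩
    rw [List.getD_eq_getElem?_getD, List.getElem?_set]
    by_cases hjx : idx101 (x + (n : Int)) = i
    · rw [if_pos hjx, if_pos (by rw [ihlen]; omega)]
      simp only [Option.getD_some]
      rw [if_pos (by rw [← hjx]; rcases hix with hh | hh <;> push_cast <;> omega), ← hjx]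
    · rw [if_neg hjx, ← List.getD_eq_getElem?_getD, ihget i hi]
      have hne : ¬((i : Int) = x + n ∨ (i : Int) - 101 = x + n) := by
        rintro (hq | hq) <;> exact hjx (by rcases hix with hh | hh <;> omega)
      by_cases hc : (x ≤ (i : Int) ∧ (i : Int) < x + (n : Int))
          ∨ (x ≤ (i : Int) - 101 ∧ (i : Int) - 101 < x + (n : Int))
      · rw [if_pos hc, if_pos (by push_cast; push_cast at hc; omega)]
      · rw [if_neg hc, if_neg (by push_cast; push_cast at hc; omega)]

lemma boardMark_spec (b : List (List Int)) (y x : Int)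
    (hy : -101 ≤ y) (hy' : y ≤ 91) (hx : -101 ≤ x) (hx' : x ≤ 91)
    (hlen : b.length = 101) (hrow : ∀ i : Nat, i < 101 → (b.getD i []).length = 101) :
    (boardMark b y x).length = 101 ∧
    (∀ i : Nat, i < 101 → ((boardMark b y x).getD i []).length = 101) ∧
    ∀ i j : Nat, i < 101 → j < 101 →
      bget (boardMark b y x) i j
        = if ((x ≤ (i : Int) ∧ (i : Int) < x + 10) ∨ (x ≤ (i : Int) - 101 ∧ (i : Int) - 101 < x + 10))
            ∧ ((y ≤ (j : Int) ∧ (j : Int) < y + 10) ∨ (y ≤ (j : Int) - 101 ∧ (j : Int) - 101 < y + 10))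
          then 1 else bget b i j := by
  unfold boardMark
  rw [PySem.List.pyRange_one, show ((x + 10) - x).toNat = 10 from by omega]
  obtain ⟨h1, h3⟩ := boardMarkN y x hy hy' hx 10 b (by omega) (by push_cast; omega) hlen hrow
  have hrm : ∀ i : Nat, i < 101 →
      (rowMark (b.getD i []) y).length = 101 ∧
      ∀ j : Nat, j < 101 → (rowMark (b.getD i []) y).getD j 0
        = if (y ≤ (j : Int) ∧ (j : Int) < y + 10)
            ∨ (y ≤ (j : Int) - 101 ∧ (j : Int) - 101 < y + 10)
          then 1 else (b.getD i []).getD j 0 := by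
    intro i hi
    exact rowMark_spec (b.getD i []) y hy hy' (hrow i hi)
  refine ⟨h1, fun i hi => ?_, fun i j hi hj => ?_⟩
  · rw [h3 i hi]
    by_cases hc : (x ≤ (i : Int) ∧ (i : Int) < x + ((10 : Nat) : Int))
        ∨ (x ≤ (i : Int) - 101 ∧ (i : Int) - 101 < x + ((10 : Nat) : Int))
    · rw [if_pos hc]
      exact (hrm i hi).1
    · rw [if_neg hc]
      exact hrow i hi
  · unfold bget
    rw [h3 i hi]
    by_cases hc : (x ≤ (i : Int) ∧ (i : Int) < x + ((10 : Nat) : Int))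
        ∨ (x ≤ (i : Int) - 101 ∧ (i : Int) - 101 < x + ((10 : Nat) : Int))
    · rw [if_pos hc]
      rw [(hrm i hi).2 j hj]
      by_cases hcy : (y ≤ (j : Int) ∧ (j : Int) < y + 10)
          ∨ (y ≤ (j : Int) - 101 ∧ (j : Int) - 101 < y + 10)
      · rw [if_pos hcy, if_pos ⟨by push_cast at hc; omega, hcy⟩]
      · rw [if_neg hcy, if_neg (by push_cast at hc hcy ⊢; intro hq; exact hcy hq.2)]
    · rw [if_neg hc, if_neg (by push_cast at hc ⊢; intro hq; exact hc hq.1)]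

lemma fold_board_spec : ∀ (papers : List (List Int)), Pre_solution papers →
    ∀ b : List (List Int), b.length = 101 →
      (∀ i : Nat, i < 101 → (b.getD i []).length = 101) →
      (papers.foldl (fun b p =>
        match p with
        | [y, x] => boardMark b y x
        | _ => b) b).length = 101 ∧
      (∀ i : Nat, i < 101 →
        ((papers.foldl (fun b p =>
          match p with
          | [y, x] => boardMark b y x
          | _ => b) b).getD i []).length = 101) ∧
      ∀ i j : Nat, i < 101 → j < 101 →
        bget (papers.foldl (fun b p =>
          match p with
          | [y, x] => boardMark b y x
          | _ => b) b) i j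
          = if covB papers (i : Int) (j : Int) = true then 1 else bget b i j := by
  intro papers
  induction papers with
  | nil =>
    intro _ b h1 h2
    exact ⟨h1, h2, fun i j _ _ => by simp [covB]⟩
  | cons p ps ih =>
    intro hpre b hb1 hb2
    obtain ⟨yv, xv, rfl, hy0, hy1, hx0, hx1⟩ := pre_pair hpre (List.mem_cons_self ..)
    have hps : Pre_solution ps := fun q hq => hpre q (List.mem_cons_of_mem _ hq)
    obtain ⟨m1, m2, m3⟩ := boardMark_spec b yv xv (by omega) hy1 hx0 hx1 hb1 hb2
    obtain ⟨f1, f2, f3⟩ := ih hps (boardMark b yv xv) m1 m2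
    refine ⟨f1, f2, fun i j hi hj => ?_⟩
    have e1 : bget (([yv, xv] :: ps).foldl (fun b p =>
        match p with
        | [y, x] => boardMark b y x
        | _ => b) b) i j
        = bget (ps.foldl (fun b p =>
        match p with
        | [y, x] => boardMark b y x
        | _ => b) (boardMark b yv xv)) i j := rfl
    rw [e1, f3 i j hi hj, m3 i j hi hj]
    have hcons : covB ([yv, xv] :: ps) (i : Int) (j : Int)
        = (decide (((xv ≤ (i : Int) ∧ (i : Int) < xv + 10) ∨ (xv ≤ (i : Int) - 101 ∧ (i : Int) - 101 < xv + 10))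
            ∧ ((yv ≤ (j : Int) ∧ (j : Int) < yv + 10) ∨ (yv ≤ (j : Int) - 101 ∧ (j : Int) - 101 < yv + 10)))
            || covB ps (i : Int) (j : Int)) := by
      simp [covB, List.any_cons, inSq]
    rw [hcons]
    by_cases hB : covB ps (i : Int) (j : Int) = true
    · rw [if_pos hB, hB, Bool.or_true]
      simp
    · have hB' : covB ps (i : Int) (j : Int) = false := by simpa using hB
      rw [if_neg hB, hB', Bool.or_false]
      by_cases hA : ((xv ≤ (i : Int) ∧ (i : Int) < xv + 10) ∨ (xv ≤ (i : Int) - 101 ∧ (i : Int) - 101 < xv + 10))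
          ∧ ((yv ≤ (j : Int) ∧ (j : Int) < yv + 10) ∨ (yv ≤ (j : Int) - 101 ∧ (j : Int) - 101 < yv + 10))
      · rw [if_pos hA, if_pos (by simpa using hA)]
      · rw [if_neg hA, if_neg (by simpa using hA)]

lemma row_sum_of_pointwise (r : List Int) (n : Nat) (g : Nat -> Int)
    (hl : r.length = n) (hp : ∀ j : Nat, j < n → r.getD j 0 = g j) :
    r.sum = ((List.range n).map g).sum := by
  have hr : r = (List.range n).map g := by
    apply List.ext_getElem
    · simp [hl]
    · intro i h1 h2
      have hi : i < n := by simpa [hl] using h1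
      have hg := hp i hi
      rw [List.getD_eq_getElem r 0 h1] at hg
      simp [hg]
  rw [hr]

lemma a_eq (papers : List (List Int)) (hpre : Pre_solution papers) :
    solution papers
      = ((List.range 101).map (fun (i : Nat) => colCount papers (i : Int))).sum := by
  obtain ⟨f1, f2, f3⟩ := fold_board_spec papers hpre
    (List.replicate 101 (List.replicate 101 0)) (by simp)
    (fun i hi => by rw [List.getD_replicate _ hi]; simp)
  have hsol : solution papers = (papers.foldl (fun b p =>
      match p with
      | [y, x] => boardMark b y x
      | _ => b) (List.replicate 101 (List.replicate 101 0))).foldl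
      (fun result b => result + b.sum) 0 := rfl
  rw [hsol, PySem.List.foldl_add, zero_add]
  congr 1
  apply List.ext_getElem (by simp only [List.length_map, List.length_range, f1])
  intro i h1 h2
  have hi : i < 101 := by
    simp only [List.length_map, f1] at h1
    exact h1
  simp only [List.getElem_map, List.getElem_range]
  rw [← List.getD_eq_getElem _ [] (by rw [f1]; exact hi)]
  rw [row_sum_of_pointwise _ 101
    (fun (j : Nat) => if covB papers (i : Int) (j : Int) = true then 1 else 0)
    (f2 i hi) (fun j hj => by
      have h := f3 i j hi hj
      unfold bget at h
      rw [h, List.getD_replicate _ hi, List.getD_replicate _ hj])]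
  rw [PySem.List.sum_map_ite_one_zero
    (fun (j : Nat) => covB papers (i : Int) (j : Int)) (List.range 101)]
  rfl

-- ===== VERDICT (by name: the statement is the Claim_ definition above) =====
theorem solution_spec : Claim_equal_solution := by
  intro papers _ hpre
  unfold Spec_solution
  rw [a_eq papers hpre, alt_eq papers hpre]
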